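-- pv_equiv track=rewrite | github.com/ssiddhantsharma/boltz-input-generator | boltz_generator.py | get_next_chain
-- ===== SOURCE A (Python) =====
-- def get_next_chain(used_chains):
--     """Generate next available chain ID"""
--     # Single letters first
--     for chain in (chr(i) for i in range(ord('A'), ord('Z')+1)):
--         if chain not in used_chains:
--             return chain
--
--     # Two-letter combinations
--     for first in (chr(i) for i in range(ord('A'), ord('Z')+1)):
--         for second in (chr(i) for i in range(ord('A'), ord('Z')+1)):
--             chain = first + second
--             if chain not in used_chains:
--                 return chain
--
--     # Three-letter combinations (unlikely to be needed)
--     for first in (chr(i) for i in range(ord('A'), ord('Z')+1)):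
--         for second in (chr(i) for i in range(ord('A'), ord('Z')+1)):
--             for third in (chr(i) for i in range(ord('A'), ord('Z')+1)):
--                 chain = first + second + third
--                 if chain not in used_chains:
--                     return chain
--
--     return None
-- ===== SOURCE B (Python) =====
-- def get_next_chain(used_chains):
--     """Generate next available chain ID"""
--     # Candidates A..Z, AA..ZZ, AAA..ZZZ are exactly bijective base-26 numerals 1..18278.
--     for n in range(1, 18279):
--         s = ""
--         m = n
--         while m:
--             m, r = divmod(m - 1, 26)
--             s = chr(65 + r) + s
--         if s not in used_chains:
--             return s
--     return None
-- ===== Notes on version B (the rewrite author's own statement) =====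
-- stated objective: idiomatic
-- what changed: Replaces the three hand-written nested letter loops (1/2/3-letter candidates) by a single loop over the integers 1..18278 decoded as bijective base-26 (Excel column) names.
import Mathlib
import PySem

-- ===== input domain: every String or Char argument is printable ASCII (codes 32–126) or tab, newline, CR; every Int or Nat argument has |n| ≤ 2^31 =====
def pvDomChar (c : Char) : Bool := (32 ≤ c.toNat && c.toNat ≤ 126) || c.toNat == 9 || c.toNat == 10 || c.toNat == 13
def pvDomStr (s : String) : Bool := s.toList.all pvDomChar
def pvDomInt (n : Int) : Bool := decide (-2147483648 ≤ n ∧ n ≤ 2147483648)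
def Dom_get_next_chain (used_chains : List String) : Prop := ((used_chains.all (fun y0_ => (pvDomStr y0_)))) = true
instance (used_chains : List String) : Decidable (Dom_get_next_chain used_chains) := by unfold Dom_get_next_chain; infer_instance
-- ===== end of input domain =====

-- B replaces A's three nested letter loops by one loop decoding 1..18278 as bijective base-26 names (idiomatic; same cost).

-- ===== PORT A =====
-- chr(i) for i in 65..90 (always in range here, so Char.ofNat is exact)
def pvChr (i : Int) : String := String.ofList [Char.ofNat i.toNat]

-- first nested loop: single letters, early return on 'chain not in used_chains'
def pvLoop1 (is : List Int) (used : List String) : Option String :=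
  match is with
  | [] => none
  | i :: rest =>
    let chain := pvChr i
    if ¬ used.contains chain then some chain else pvLoop1 rest used

-- inner loop of the two-letter block
def pvLoop2b (first : String) (js : List Int) (used : List String) : Option String :=
  match js with
  | [] => none
  | j :: rest =>
    let chain := first ++ pvChr j
    if ¬ used.contains chain then some chain else pvLoop2b first rest used

-- outer loop of the two-letter block
def pvLoop2 (is : List Int) (used : List String) : Option String :=
  match is with
  | [] => none
  | i :: rest =>
    match pvLoop2b (pvChr i) (PySem.List.pyRange 65 91 1) used with
    | some s => some s
    | none => pvLoop2 rest used

-- innermost loop of the three-letter block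
def pvLoop3c (pre : String) (ks : List Int) (used : List String) : Option String :=
  match ks with
  | [] => none
  | k :: rest =>
    let chain := pre ++ pvChr k
    if ¬ used.contains chain then some chain else pvLoop3c pre rest used

-- middle loop of the three-letter block
def pvLoop3b (first : String) (js : List Int) (used : List String) : Option String :=
  match js with
  | [] => none
  | j :: rest =>
    match pvLoop3c (first ++ pvChr j) (PySem.List.pyRange 65 91 1) used with
    | some s => some s
    | none => pvLoop3b first rest used

-- outer loop of the three-letter block
def pvLoop3 (is : List Int) (used : List String) : Option String :=
  match is with
  | [] => none
  | i :: rest =>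
    match pvLoop3b (pvChr i) (PySem.List.pyRange 65 91 1) used with
    | some s => some s
    | none => pvLoop3 rest used

def get_next_chain (used_chains : List String) : Option String :=
  match pvLoop1 (PySem.List.pyRange 65 91 1) used_chains with
  | some s => some s
  | none =>
    match pvLoop2 (PySem.List.pyRange 65 91 1) used_chains with
    | some s => some s
    | none =>
      match pvLoop3 (PySem.List.pyRange 65 91 1) used_chains with
      | some s => some s
      | none => none

-- ===== PORT B =====
-- the while loop of Source B: m starts at n ≥ 1 and stays ≥ 0, so it is a Nat recursion;
-- divmod(m-1, 26) with m = k+1 > 0 is exactly (k / 26, k % 26) on Nat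
-- fuel makes the recursion structural (kernel-reducible); m decreases each step, so fuel = m suffices
def pvDecodeAux : Nat → Nat → String → String
  | _, 0, s => s
  | 0, _ + 1, s => s  -- unreachable: fuel ≥ m throughout
  | fuel + 1, k + 1, s => pvDecodeAux fuel (k / 26) (String.ofList [Char.ofNat (65 + k % 26)] ++ s)

def pvDecode (m : Nat) (s : String) : String := pvDecodeAux m m s

-- the for loop over range(1, 18279)
def pvLoopB (ns : List Int) (used : List String) : Option String :=
  match ns with
  | [] => none
  | n :: rest =>
    let s := pvDecode n.toNat ""
    if ¬ used.contains s then some s else pvLoopB rest used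

def get_next_chain_alt (used_chains : List String) : Option String :=
  pvLoopB (PySem.List.pyRange 1 18279 1) used_chains

-- ===== PRECONDITION & SPEC =====
def Spec_get_next_chain (used_chains : List String) (out : Option String) : Prop := out = get_next_chain_alt used_chains
instance (used_chains : List String) (out : Option String) : Decidable (Spec_get_next_chain used_chains out) := by unfold Spec_get_next_chain; infer_instance

-- ===== CLAIM (what is proved, stated in full; the proofs are below) =====
def Claim_equal_get_next_chain : Prop := ∀ (used_chains : List String), Dom_get_next_chain used_chains → Spec_get_next_chain used_chains (get_next_chain used_chains)

-- ===== LEMMAS AND PROOFS =====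

-- the first-unused scan, abstracted: List.find? of "not used"
def pvFirstNot (used : List String) (cands : List String) : Option String :=
  cands.find? (fun c => ¬ used.contains c)

-- the one-letter string for residue k % 26
def pvChStr (k : Nat) : String := String.ofList [Char.ofNat (65 + k % 26)]

-- decode as a function of the number alone
def pvDec (m : Nat) : String := pvDecodeAux m m ""

theorem pvLoop1_eq (is : List Int) (used : List String) :
    pvLoop1 is used = pvFirstNot used (is.map pvChr) := by
  induction is with
  | nil => rfl
  | cons i rest ih => simp [pvLoop1, pvFirstNot, List.find?] at *; split_ifs <;> simp_all

theorem pvLoop2b_eq (first : String) (js : List Int) (used : List String) :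
    pvLoop2b first js used = pvFirstNot used (js.map (fun j => first ++ pvChr j)) := by
  induction js with
  | nil => rfl
  | cons j rest ih => simp [pvLoop2b, pvFirstNot, List.find?] at *; split_ifs <;> simp_all

theorem pvLoop3c_eq (pre : String) (ks : List Int) (used : List String) :
    pvLoop3c pre ks used = pvFirstNot used (ks.map (fun k => pre ++ pvChr k)) := by
  induction ks with
  | nil => rfl
  | cons k rest ih => simp [pvLoop3c, pvFirstNot, List.find?] at *; split_ifs <;> simp_all

theorem pvFind?_append_match (p : String → Bool) (l1 l2 : List String) :
    List.find? p (l1 ++ l2) =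
      match List.find? p l1 with
      | some s => some s
      | none => List.find? p l2 := by
  rw [List.find?_append]
  cases List.find? p l1 <;> rfl

theorem pvFirstNot_append (used : List String) (l1 l2 : List String) :
    pvFirstNot used (l1 ++ l2) =
      match pvFirstNot used l1 with
      | some s => some s
      | none => pvFirstNot used l2 := by
  unfold pvFirstNot
  exact pvFind?_append_match _ _ _

theorem pvLoop2_eq (is : List Int) (used : List String) :
    pvLoop2 is used =
      pvFirstNot used (is.flatMap (fun i => (PySem.List.pyRange 65 91 1).map (fun j => pvChr i ++ pvChr j))) := by
  induction is with
  | nil => rfl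
  | cons i rest ih =>
    simp only [pvLoop2, List.flatMap_cons, pvFirstNot_append, pvLoop2b_eq, ih]

theorem pvLoop3b_eq (first : String) (js : List Int) (used : List String) :
    pvLoop3b first js used =
      pvFirstNot used (js.flatMap (fun j => (PySem.List.pyRange 65 91 1).map (fun k => (first ++ pvChr j) ++ pvChr k))) := by
  induction js with
  | nil => rfl
  | cons j rest ih =>
    simp only [pvLoop3b, List.flatMap_cons, pvFirstNot_append, pvLoop3c_eq, ih]

theorem pvLoop3_eq (is : List Int) (used : List String) :
    pvLoop3 is used =
      pvFirstNot used (is.flatMap (fun i => (PySem.List.pyRange 65 91 1).flatMap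
        (fun j => (PySem.List.pyRange 65 91 1).map (fun k => (pvChr i ++ pvChr j) ++ pvChr k)))) := by
  induction is with
  | nil => rfl
  | cons i rest ih =>
    simp only [pvLoop3, List.flatMap_cons, pvFirstNot_append, pvLoop3b_eq, ih]

theorem pvLoopB_eq (ns : List Int) (used : List String) :
    pvLoopB ns used = pvFirstNot used (ns.map (fun n => pvDecode n.toNat "")) := by
  induction ns with
  | nil => rfl
  | cons n rest ih => simp [pvLoopB, pvFirstNot, List.find?] at *; split_ifs <;> simp_all

-- the candidate sequences of the two programs
def pvCandsA : List String :=
  (PySem.List.pyRange 65 91 1).map pvChr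
  ++ (PySem.List.pyRange 65 91 1).flatMap (fun i => (PySem.List.pyRange 65 91 1).map (fun j => pvChr i ++ pvChr j))
  ++ (PySem.List.pyRange 65 91 1).flatMap (fun i => (PySem.List.pyRange 65 91 1).flatMap
       (fun j => (PySem.List.pyRange 65 91 1).map (fun k => (pvChr i ++ pvChr j) ++ pvChr k)))

def pvCandsB : List String :=
  (PySem.List.pyRange 1 18279 1).map (fun n => pvDecode n.toNat "")

-- pvDecodeAux with enough fuel only appends to its accumulator
theorem pvDecodeAux_acc (m : Nat) : ∀ (fuel : Nat) (s : String), m ≤ fuel →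
    pvDecodeAux fuel m s = pvDec m ++ s := by
  induction m using Nat.strong_induction_on with
  | _ m ih =>
    intro fuel s hmf
    match m, fuel with
    | 0, fuel => simp [pvDecodeAux, pvDec]
    | k + 1, fuel + 1 =>
      have hq : k / 26 < k + 1 := Nat.lt_succ_of_le (Nat.div_le_self k 26)
      have h1 : k / 26 ≤ fuel := le_trans (Nat.div_le_self k 26) (Nat.succ_le_succ_iff.mp hmf)
      have h2 : k / 26 ≤ k := Nat.div_le_self k 26
      show pvDecodeAux (fuel + 1) (k + 1) s = pvDec (k + 1) ++ s
      rw [pvDecodeAux, pvDec, pvDecodeAux, ih _ hq _ _ h1, ih _ hq _ _ h2]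
      simp [String.append_assoc]

theorem pvDec_succ (k : Nat) : pvDec (k + 1) = pvDec (k / 26) ++ pvChStr k := by
  rw [pvDec, pvDecodeAux, pvDecodeAux_acc _ _ _ (Nat.div_le_self k 26)]
  simp [pvChStr]

theorem pvDec_zero : pvDec 0 = "" := rfl

-- pvChStr only depends on the argument mod 26
theorem pvChStr_mod (a b : Nat) (h : a % 26 = b % 26) : pvChStr a = pvChStr b := by
  simp [pvChStr, h]

-- the three decode characterisations
theorem pvDec1 (k : Nat) (h : k < 26) : pvDec (k + 1) = pvChStr k := by
  rw [pvDec_succ, Nat.div_eq_of_lt h, pvDec_zero]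
  simp

theorem pvDec2 (k : Nat) (h : k < 676) : pvDec (k + 27) = pvChStr (k / 26) ++ pvChStr k := by
  have e : k + 27 = (k + 26) + 1 := by omega
  rw [e, pvDec_succ]
  have e2 : (k + 26) / 26 = k / 26 + 1 := by omega
  rw [e2, pvDec1 _ (by omega), pvChStr_mod (k + 26) k (by omega)]

theorem pvDec3 (k : Nat) (h : k < 17576) :
    pvDec (k + 703) = (pvChStr (k / 26 / 26) ++ pvChStr (k / 26)) ++ pvChStr k := by
  have e : k + 703 = (k + 702) + 1 := by omega
  rw [e, pvDec_succ]
  have e2 : (k + 702) / 26 = k / 26 + 27 := by omega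
  rw [e2, pvDec2 (k / 26) (by omega), pvChStr_mod (k + 702) k (by omega)]

theorem pvFlatMap_congr {α β : Type} {l : List α} {f g : α → List β}
    (h : ∀ a ∈ l, f a = g a) : l.flatMap f = l.flatMap g := by
  induction l with
  | nil => rfl
  | cons x xs ih =>
    simp only [List.flatMap_cons, h x (List.mem_cons_self), ih (fun a ha => h a (List.mem_cons_of_mem _ ha))]

-- flattening a double loop over ranges into one range
theorem pvRange_mul_flatMap {α : Type} (A B : Nat) (f : Nat → α) :
    (List.range (A * B)).map f
      = (List.range A).flatMap (fun a => (List.range B).map (fun b => f (B * a + b))) := by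
  induction A with
  | zero => simp
  | succ A ih =>
    have e : (A + 1) * B = A * B + B := by ring
    rw [e, List.range_add, List.map_append, ih, List.range_succ, List.flatMap_append]
    simp [List.map_map, Function.comp, Nat.mul_comm]

-- the integer range maps to a Nat range
theorem pvRange_letters :
    PySem.List.pyRange 65 91 1 = (List.range 26).map (fun a : Nat => (65 : Int) + (a : Int)) := by
  rw [PySem.List.pyRange_one]
  rfl

theorem pvRange_B :
    PySem.List.pyRange 1 18279 1 = (List.range 18278).map (fun k : Nat => (1 : Int) + (k : Int)) := by
  rw [PySem.List.pyRange_one]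
  rfl

theorem pvChr_nat (a : Nat) (h : a < 26) : pvChr ((65 : Int) + a) = pvChStr a := by
  simp only [pvChr, pvChStr, Nat.mod_eq_of_lt h]
  rw [show ((65 : Int) + a).toNat = 65 + a from by omega]

theorem pvDecode_eq (m : Nat) : pvDecode m "" = pvDec m := rfl

-- both concrete candidate lists enumerate A, …, Z, AA, …, ZZZ
theorem pvCands_eq : pvCandsA = pvCandsB := by
  have L := pvRange_letters
  -- singles
  have h1 : ((List.range 26).map (fun a : Nat => (65 : Int) + (a : Int))).map pvChr
      = (List.range 26).map (fun k => pvDec (k + 1)) := by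
    rw [List.map_map]
    apply List.map_congr_left; intro a ha
    rw [List.mem_range] at ha
    simp only [Function.comp_apply]
    rw [pvChr_nat a ha, pvDec1 a ha]
  -- pairs
  have h2 : ((List.range 26).map (fun a : Nat => (65 : Int) + (a : Int))).flatMap
        (fun i => ((List.range 26).map (fun a : Nat => (65 : Int) + (a : Int))).map (fun j => pvChr i ++ pvChr j))
      = (List.range 676).map (fun k => pvDec (k + 27)) := by
    rw [List.flatMap_map]
    have hflat := pvRange_mul_flatMap 26 26 (fun k => pvDec (k + 27))
    rw [show ((26 : Nat) * 26) = 676 from rfl] at hflat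
    rw [hflat]
    apply pvFlatMap_congr; intro a ha
    rw [List.mem_range] at ha
    simp only [List.map_map]
    apply List.map_congr_left; intro b hb
    rw [List.mem_range] at hb
    simp only [Function.comp_apply]
    rw [pvChr_nat a ha, pvChr_nat b hb, pvDec2 _ (by omega)]
    have e1 : (26 * a + b) / 26 = a := by omega
    rw [e1, pvChStr_mod (26 * a + b) b (by omega)]
  -- triples
  have h3 : ((List.range 26).map (fun a : Nat => (65 : Int) + (a : Int))).flatMap
        (fun i => ((List.range 26).map (fun a : Nat => (65 : Int) + (a : Int))).flatMap
          (fun j => ((List.range 26).map (fun a : Nat => (65 : Int) + (a : Int))).map (fun k => (pvChr i ++ pvChr j) ++ pvChr k)))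
      = (List.range 17576).map (fun k => pvDec (k + 703)) := by
    have hflat := pvRange_mul_flatMap 26 676 (fun k => pvDec (k + 703))
    rw [show ((26 : Nat) * 676) = 17576 from rfl] at hflat
    rw [hflat, List.flatMap_map]
    apply pvFlatMap_congr; intro a ha
    rw [List.mem_range] at ha
    have hflat2 := pvRange_mul_flatMap 26 26 (fun b => pvDec ((676 * a + b) + 703))
    rw [show ((26 : Nat) * 26) = 676 from rfl] at hflat2
    rw [hflat2]
    simp only [List.flatMap_map]
    apply pvFlatMap_congr; intro b hb
    rw [List.mem_range] at hb
    simp only [List.map_map]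
    apply List.map_congr_left; intro c hc
    rw [List.mem_range] at hc
    simp only [Function.comp_apply]
    rw [pvChr_nat a ha, pvChr_nat b hb, pvChr_nat c hc, pvDec3 _ (by omega)]
    have d1 : (676 * a + (26 * b + c)) / 26 = 26 * a + b := by omega
    rw [d1]
    have d2 : (26 * a + b) / 26 = a := by omega
    rw [d2, pvChStr_mod (26 * a + b) b (by omega),
        pvChStr_mod (676 * a + (26 * b + c)) c (by omega)]
  -- B side: a Nat-indexed map of pvDec over 1..18278, split in three chunks
  have hB : pvCandsB = (List.range 26).map (fun k => pvDec (k + 1))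
      ++ ((List.range 676).map (fun k => pvDec (k + 27))
      ++ (List.range 17576).map (fun k => pvDec (k + 703))) := by
    rw [pvCandsB, pvRange_B, List.map_map]
    rw [show (18278 : Nat) = 26 + (676 + 17576) from by omega, List.range_add, List.range_add]
    simp only [List.map_append, List.map_map]
    refine congrArg₂ (· ++ ·) ?_ (congrArg₂ (· ++ ·) ?_ ?_) <;>
    · apply List.map_congr_left; intro a _
      simp only [Function.comp_apply]
      rw [pvDecode_eq]
      congr 1
      omega
  rw [pvCandsA, L, hB, List.append_assoc, h1, h2, h3]

theorem getA_eq (used : List String) : get_next_chain used = pvFirstNot used pvCandsA := by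
  simp only [get_next_chain, pvLoop1_eq, pvLoop2_eq, pvLoop3_eq, pvCandsA, pvFirstNot_append]
  cases pvFirstNot used ((PySem.List.pyRange 65 91 1).map pvChr) with
  | some s => rfl
  | none =>
    cases pvFirstNot used ((PySem.List.pyRange 65 91 1).flatMap (fun i => (PySem.List.pyRange 65 91 1).map (fun j => pvChr i ++ pvChr j))) with
    | some s => rfl
    | none =>
      cases pvFirstNot used ((PySem.List.pyRange 65 91 1).flatMap (fun i => (PySem.List.pyRange 65 91 1).flatMap
        (fun j => (PySem.List.pyRange 65 91 1).map (fun k => (pvChr i ++ pvChr j) ++ pvChr k)))) <;> rfl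

-- ===== VERDICT (by name: the statement is the Claim_ definition above) =====
theorem get_next_chain_spec : Claim_equal_get_next_chain := by
  intro used _
  unfold Spec_get_next_chain
  rw [getA_eq, pvCands_eq, get_next_chain_alt, pvLoopB_eq]
  rfl
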